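-- pv_equiv track=rewrite | github.com/bullet227/unconventional_features_extraction | ml_pipeline/backtester.py | _max_streak
-- ===== SOURCE A (Python) =====
-- from typing import Dict, List, Optional, Tuple, Any, Union
--
-- def _max_streak(values: List[bool], target: bool) -> int:
--     """Find maximum consecutive occurrences of target value."""
--     max_streak = 0
--     current = 0
--     for v in values:
--         if v == target:
--             current += 1
--             max_streak = max(max_streak, current)
--         else:
--             current = 0
--     return max_streak
-- ===== SOURCE B (Python) =====
-- from typing import List
--
-- def _max_streak(values: List[bool], target: bool) -> int:
--     """Find maximum consecutive occurrences of target value."""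
--     # Positions where the streak is broken, with sentinels at -1 and len(values);
--     # the answer is the largest distance between consecutive breaks, minus one.
--     breaks = [-1] + [i for i, v in enumerate(values) if v != target] + [len(values)]
--     return max(b - a - 1 for a, b in zip(breaks, breaks[1:]))
-- ===== Notes on version B (the rewrite author's own statement) =====
-- stated objective: alternative
-- what changed: Replaces the running counter-with-reset loop by a break-position formulation: collect indices of elements != target (with sentinels -1 and len), then the answer is the maximum gap b - a - 1 between consecutive break positions; no run length is ever counted.
import Mathlib
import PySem

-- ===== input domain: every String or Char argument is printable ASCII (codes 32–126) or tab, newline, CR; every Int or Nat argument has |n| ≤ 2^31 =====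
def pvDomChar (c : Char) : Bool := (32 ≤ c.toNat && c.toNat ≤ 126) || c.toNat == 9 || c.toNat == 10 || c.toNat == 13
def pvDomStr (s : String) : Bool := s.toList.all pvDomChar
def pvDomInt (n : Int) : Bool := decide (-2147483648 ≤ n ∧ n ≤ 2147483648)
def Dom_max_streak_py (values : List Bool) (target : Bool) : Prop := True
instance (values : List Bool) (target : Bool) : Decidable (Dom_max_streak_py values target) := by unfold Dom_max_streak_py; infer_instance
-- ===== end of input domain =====

-- B: alternative formulation — the break positions (indices of non-target elements, with sentinels -1 and len)
-- are collected first, and the answer is the maximum gap between consecutive breaks; same O(n) cost.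

-- ===== PORT A =====
-- literal port of A's loop: state (max_streak, current)
def max_streak_py (values : List Bool) (target : Bool) : Int :=
  (values.foldl
    (fun (s : Int × Int) v =>
      if v == target then (max s.1 (s.2 + 1), s.2 + 1) else (s.1, 0))
    (0, 0)).1

-- ===== PORT B =====
-- zip(breaks, breaks[1:]) mapped to the gap b - a - 1
def pvGapsOf (l : List Int) : List Int := (l.zip l.tail).map (fun p => p.2 - p.1 - 1)

def max_streak_py_alt (values : List Bool) (target : Bool) : Int :=
  -- breaks = [-1] + [i for i, v in enumerate(values) if v != target] + [len(values)]
  -- max over the (always nonempty) generator of gaps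
  match pvGapsOf ((-1) :: ((values.zipIdx.filterMap
      (fun p => if p.1 != target then some ((p.2 : Int)) else none)) ++ [(values.length : Int)])) with
  | [] => 0          -- unreachable: breaks always has at least two elements
  | g :: gs => gs.foldl max g

-- ===== PRECONDITION & SPEC =====
def Spec_max_streak_py (values : List Bool) (target : Bool) (out : Int) : Prop := out = max_streak_py_alt values target
instance (values : List Bool) (target : Bool) (out : Int) : Decidable (Spec_max_streak_py values target out) := by unfold Spec_max_streak_py; infer_instance

-- ===== CLAIM (what is proved, stated in full; the proofs are below) =====
def Claim_equal_max_streak_py : Prop := ∀ (values : List Bool) (target : Bool), Dom_max_streak_py values target → Spec_max_streak_py values target (max_streak_py values target)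

-- ===== LEMMAS AND PROOFS =====

-- reference gap list: gaps emitted left to right, c = length of the current run of target behind us
def pvGaps (vs : List Bool) (t : Bool) (c : Int) : List Int :=
  match vs with
  | [] => [c]
  | v :: rest => if v == t then pvGaps rest t (c + 1) else c :: pvGaps rest t 0

theorem pvGapsOf_cons (a b : Int) (l : List Int) :
    pvGapsOf (a :: b :: l) = (b - a - 1) :: pvGapsOf (b :: l) := by
  simp [pvGapsOf]

-- the port's gap list equals pvGaps, for any start offset k and previous break a
theorem pvBridge (t : Bool) : ∀ (vs : List Bool) (a : Int) (k : Nat),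
    pvGapsOf (a :: ((vs.zipIdx k).filterMap
        (fun p => if p.1 != t then some ((p.2 : Int)) else none)
      ++ [(k : Int) + vs.length])) = pvGaps vs t ((k : Int) - a - 1) := by
  intro vs
  induction vs with
  | nil =>
    intro a k
    simp [pvGapsOf, pvGaps]
  | cons v rest ih =>
    intro a k
    rw [List.zipIdx_cons]
    by_cases hv : (v == t) = true
    · have : (v != t) = false := by simp [bne, hv]
      simp only [List.filterMap_cons, this, Bool.false_eq_true, if_false]
      have := ih a (k + 1)
      rw [pvGaps, if_pos hv]
      have hlen : (k : Int) + (v :: rest).length = ((k + 1 : Nat) : Int) + rest.length := by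
        push_cast [List.length_cons]; ring
      rw [hlen, this]
      congr 1
      push_cast; ring
    · have hvf : (v == t) = false := Bool.eq_false_iff.mpr hv
      have : (v != t) = true := by simp [bne, hvf]
      simp only [List.filterMap_cons, this, if_true]
      have hlen : (k : Int) + (v :: rest).length = ((k + 1 : Nat) : Int) + rest.length := by
        push_cast [List.length_cons]; ring
      rw [List.cons_append, pvGapsOf_cons, hlen, ih (k : Int) (k + 1)]
      rw [pvGaps, if_neg hv]
      congr 2
      push_cast; ring

-- folding max may start at max m c instead of m: some later gap dominates c
theorem pvFold_shift (t : Bool) : ∀ (vs : List Bool) (c m : Int),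
    (pvGaps vs t c).foldl max (max m c) = (pvGaps vs t c).foldl max m := by
  intro vs
  induction vs with
  | nil => intro c m; simp only [pvGaps, List.foldl]; omega
  | cons v rest ih =>
    intro c m
    by_cases hv : (v == t) = true
    · rw [pvGaps, if_pos hv]
      have h1 := ih (c + 1) (max m c)
      have h2 := ih (c + 1) m
      have : max (max m c) (c + 1) = max m (c + 1) := by omega
      rw [← h1, ← h2, this]
    · rw [pvGaps, if_neg hv]
      simp only [List.foldl_cons]
      have : max (max m c) c = max m c := by omega
      rw [this]

-- invariant of A's loop against the gap list
theorem pvLoop_eq_gaps (t : Bool) : ∀ (vs : List Bool) (m c : Int), 0 ≤ c → c ≤ m →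
    (vs.foldl
      (fun (s : Int × Int) v =>
        if v == t then (max s.1 (s.2 + 1), s.2 + 1) else (s.1, 0))
      (m, c)).1 = (pvGaps vs t c).foldl max m := by
  intro vs
  induction vs with
  | nil => intro m c h0 hcm; simp [pvGaps]; omega
  | cons v rest ih =>
    intro m c h0 hcm
    rw [List.foldl_cons]
    by_cases hv : (v == t) = true
    · rw [if_pos hv, pvGaps, if_pos hv]
      have := ih (max m (c + 1)) (c + 1) (by omega) (by omega)
      rw [this, pvFold_shift t rest (c + 1) m]
    · rw [if_neg hv, pvGaps, if_neg hv]
      rw [List.foldl_cons]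
      have hmc : max m c = m := by omega
      rw [hmc]
      exact ih m 0 le_rfl (by omega)

-- pvGaps is nonempty and its head dominates c
theorem pvGaps_head (t : Bool) : ∀ (vs : List Bool) (c : Int),
    ∃ g gs, pvGaps vs t c = g :: gs ∧ c ≤ g := by
  intro vs
  induction vs with
  | nil => intro c; exact ⟨c, [], rfl, le_rfl⟩
  | cons v rest ih =>
    intro c
    by_cases hv : (v == t) = true
    · obtain ⟨g, gs, he, hle⟩ := ih (c + 1)
      exact ⟨g, gs, by rw [pvGaps, if_pos hv, he], by omega⟩
    · exact ⟨c, pvGaps rest t 0, by rw [pvGaps, if_neg hv], le_rfl⟩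

-- ===== VERDICT (by name: the statement is the Claim_ definition above) =====
theorem max_streak_py_spec : Claim_equal_max_streak_py := by
  intro values target _
  unfold Spec_max_streak_py max_streak_py max_streak_py_alt
  have hb := pvBridge target values (-1) 0
  simp only [Nat.cast_zero, zero_add] at hb
  have hz : ((0 : Int) - (-1) - 1) = 0 := by ring
  rw [hz] at hb
  rw [hb]
  obtain ⟨g, gs, he, hge⟩ := pvGaps_head target values 0
  rw [pvLoop_eq_gaps target values 0 0 le_rfl le_rfl, he]
  simp only [List.foldl_cons]
  have : max (0 : Int) g = g := by omega
  rw [this]
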